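-- pv_equiv track=rewrite | github.com/navya19j/COL764-Assignments | Assignment-1/invidx_cons.py | get_posting_lists
-- ===== SOURCE A (Python) =====
-- def get_posting_lists(inv_dict):
--     posting = []
--     inv_ind_dict = {}
--
--     for i in inv_dict:
--         k = len(posting)
--         m = 0
--         for j in inv_dict[i]:
--             m += 1
--             posting.append(int(j))
--
--         inv_ind_dict[i] = [k,m]
--
--     return posting,inv_ind_dict
-- ===== SOURCE B (Python) =====
-- def get_posting_lists(inv_dict):
--     inv_ind_dict = {}
--     offset = 0
--     for term in inv_dict:
--         n = len(inv_dict[term])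
--         inv_ind_dict[term] = [offset, n]
--         offset += n
--     posting = [int(j) for term in inv_dict for j in inv_dict[term]]
--     return posting, inv_ind_dict
-- ===== Notes on version B (the rewrite author's own statement) =====
-- stated objective: alternative
-- what changed: Replaces A's single interleaved loop (which appends each posting while hand-counting m and reading len(posting) for the offset) with two separate passes: a prefix-sum offset pass that builds the index dict from len() alone, and a separate nested comprehension that flattens the posting lists.
import Mathlib
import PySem

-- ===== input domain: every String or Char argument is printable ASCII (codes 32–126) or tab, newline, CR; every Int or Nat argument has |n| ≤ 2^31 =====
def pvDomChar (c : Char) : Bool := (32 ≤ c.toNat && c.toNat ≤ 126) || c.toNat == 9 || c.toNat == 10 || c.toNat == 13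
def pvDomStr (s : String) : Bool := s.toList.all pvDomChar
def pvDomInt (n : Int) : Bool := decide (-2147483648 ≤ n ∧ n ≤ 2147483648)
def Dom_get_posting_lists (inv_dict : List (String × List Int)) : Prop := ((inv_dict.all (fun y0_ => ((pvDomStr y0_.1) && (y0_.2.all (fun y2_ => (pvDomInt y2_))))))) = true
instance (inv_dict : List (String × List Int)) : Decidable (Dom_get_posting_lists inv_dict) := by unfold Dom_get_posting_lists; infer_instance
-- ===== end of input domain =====

-- B builds the index dict by a separate prefix-sum offset pass and flattens the postings in a second pass,
-- instead of A's single interleaved count-and-append loop; same results, same cost.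

-- ===== PORT A =====
-- A's loop body: k = len(posting); inner loop 'm += 1; posting.append(int(j))'; inv_ind_dict[i] = [k, m]
def pvAstep (d : PySem.Dict String (List Int))
    (st : List Int × PySem.Dict String (List Int)) (i : String) :
    List Int × PySem.Dict String (List Int) :=
  let k : Int := st.1.length
  let inner := (d.getD i []).foldl (fun (q : Int × List Int) j => (q.1 + 1, q.2 ++ [j])) (0, st.1)
  (inner.2, st.2.insert i [k, inner.1])

def get_posting_lists (inv_dict : List (String × List Int)) : List Int × (List (String × List Int)) :=
  let d := PySem.Dict.mk inv_dict
  -- 'for i in inv_dict' iterates the dict's keys; 'inv_dict[i]' is the dict lookup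
  let st := (inv_dict.map Prod.fst).foldl (pvAstep d) ([], PySem.Dict.empty)
  (st.1, st.2.items)

-- ===== PORT B =====
-- B's offset-pass body: n = len(inv_dict[term]); inv_ind_dict[term] = [offset, n]; offset += n
def pvBstep (d : PySem.Dict String (List Int))
    (st : PySem.Dict String (List Int) × Int) (term : String) :
    PySem.Dict String (List Int) × Int :=
  let n : Int := (d.getD term []).length
  (st.1.insert term [st.2, n], st.2 + n)

def get_posting_lists_alt (inv_dict : List (String × List Int)) : List Int × (List (String × List Int)) :=
  let d := PySem.Dict.mk inv_dict
  let fin := (inv_dict.map Prod.fst).foldl (pvBstep d) (PySem.Dict.empty, 0)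
  let posting := (inv_dict.map Prod.fst).flatMap (fun term => d.getD term [])
  (posting, fin.1.items)

-- ===== PRECONDITION & SPEC =====
def Spec_get_posting_lists (inv_dict : List (String × List Int)) (out : List Int × (List (String × List Int))) : Prop := out = get_posting_lists_alt inv_dict
instance (inv_dict : List (String × List Int)) (out : List Int × (List (String × List Int))) : Decidable (Spec_get_posting_lists inv_dict out) := by unfold Spec_get_posting_lists; infer_instance

-- ===== CLAIM (what is proved, stated in full; the proofs are below) =====
def Claim_equal_get_posting_lists : Prop := ∀ (inv_dict : List (String × List Int)), Dom_get_posting_lists inv_dict → Spec_get_posting_lists inv_dict (get_posting_lists inv_dict)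

-- ===== LEMMAS AND PROOFS =====

-- A's inner counting/appending loop is append plus length
theorem pv_inner_loop (seg : List Int) : ∀ (m : Int) (p : List Int),
    seg.foldl (fun (q : Int × List Int) j => (q.1 + 1, q.2 ++ [j])) (m, p)
      = (m + seg.length, p ++ seg) := by
  induction seg with
  | nil => intro m p; simp
  | cons x xs ih =>
      intro m p
      simp only [List.foldl_cons, ih, List.length_cons, Prod.mk.injEq]
      exact ⟨by push_cast; ring, by simp⟩

-- main invariant: A's fold from (p, dd) equals (p ++ flattened, B's dict fold from (dd, len p))
theorem pv_main (d : PySem.Dict String (List Int)) :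
    ∀ (ks : List String) (p : List Int) (dd : PySem.Dict String (List Int)),
    ks.foldl (pvAstep d) (p, dd)
      = (p ++ ks.flatMap (fun t => d.getD t []),
         (ks.foldl (pvBstep d) (dd, (p.length : Int))).1) := by
  intro ks
  induction ks with
  | nil => intro p dd; simp
  | cons t ks ih =>
      intro p dd
      simp only [List.foldl_cons, List.flatMap_cons]
      rw [show pvAstep d (p, dd) t
            = (p ++ d.getD t [], dd.insert t [(p.length : Int), (d.getD t [] : List Int).length]) by
          simp [pvAstep, pv_inner_loop]]
      rw [ih, show pvBstep d (dd, (p.length : Int)) t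
            = (dd.insert t [(p.length : Int), (d.getD t [] : List Int).length],
               (p.length : Int) + (d.getD t [] : List Int).length) by
          simp [pvBstep],
        List.length_append, Int.natCast_add, List.append_assoc]

-- ===== VERDICT (by name: the statement is the Claim_ definition above) =====
theorem get_posting_lists_spec : Claim_equal_get_posting_lists := by
  intro inv_dict _
  unfold Spec_get_posting_lists get_posting_lists get_posting_lists_alt
  simp only [pv_main]
  simp
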